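-- pv_equiv track=rewrite | github.com/JorgeSTJordao/University_Projects | DiscreteMathematics/Recursive Function/Exam2/Q3/Ex1.py | rec
-- ===== SOURCE A (Python) =====
-- def rec(list_, i):
--     a = list_[i] + 3
--     b = list_[i] * 2
--     list_.append(a)
--     list_.append(b)
--     if a > 19 and b > 19:
--         return list_
--     else:
--         list_c = set(list_)
--         list_ = list(list_c)
--         list_.sort()
--         return rec(list_, i + 1)
-- ===== SOURCE B (Python) =====
-- def rec(list_, i):
--     # First round mutates the caller's list exactly like the original.
--     x = list_[i]
--     list_.append(x + 3)
--     list_.append(x * 2)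
--     if x >= 17:                      # same as a > 19 and b > 19 for ints
--         return list_
--     cur = sorted(set(list_))
--     i += 1
--     # Invariant: cur is sorted and duplicate-free; instead of rebuilding
--     # set+sort every round, insert the two derived values in place.
--     while True:
--         x = cur[i]
--         if x >= 17:
--             return cur + [x + 3, x * 2]
--         _insert_absent(cur, x + 3)
--         _insert_absent(cur, x * 2)
--         i += 1
--
-- def _insert_absent(cur, v):
--     # binary-search insertion into a sorted duplicate-free list, skipping duplicates
--     lo, hi = 0, len(cur)
--     while lo < hi:
--         mid = (lo + hi) // 2
--         if cur[mid] < v: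
--             lo = mid + 1
--         else:
--             hi = mid
--     if lo == len(cur) or cur[lo] != v:
--         cur.insert(lo, v)
-- ===== Notes on version B (the rewrite author's own statement) =====
-- stated objective: alternative
-- what changed: The tail recursion that rebuilds sorted(set(list_)) from scratch every round is replaced by a while loop keeping one sorted duplicate-free working list, testing the simplified termination condition x >= 17 before inserting, and inserting the two derived values with a hand-written binary-search insert-if-absent.
import Mathlib
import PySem

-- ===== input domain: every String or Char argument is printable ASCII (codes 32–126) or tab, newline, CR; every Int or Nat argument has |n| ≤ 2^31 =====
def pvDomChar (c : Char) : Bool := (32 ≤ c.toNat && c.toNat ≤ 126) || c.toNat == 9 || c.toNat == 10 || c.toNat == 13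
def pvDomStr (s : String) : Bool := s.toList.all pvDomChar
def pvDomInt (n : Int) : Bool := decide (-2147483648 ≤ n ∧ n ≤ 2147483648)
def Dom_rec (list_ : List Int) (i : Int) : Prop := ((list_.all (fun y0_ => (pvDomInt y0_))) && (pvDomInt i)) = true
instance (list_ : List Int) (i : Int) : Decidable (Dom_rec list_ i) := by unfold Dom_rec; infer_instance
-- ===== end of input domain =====

-- B replaces the tail recursion rebuilding sorted(set(list_)) every round by a while loop that
-- keeps one sorted duplicate-free working list, tests the simplified stop condition x >= 17
-- before deriving, and inserts the two derived values by a binary-search insert-if-absent.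
-- The equality proved is about the RETURN value; both programs append the two derived values
-- to the caller's list once before the first round, exactly alike.
-- Both ports carry a Nat fuel as a plain totality guard (a loop/recursion step consumes one
-- unit); both ports use the same fuel constant, so the guard never separates them.

-- totality fuel for the round loop: one unit per round
def pvFuel : Nat := 68719476736

-- `sorted(set(xs))` — the canonicalisation step of program A
def pvNxt (xs : List Int) : List Int :=
  PySem.List.sorted (PySem.Set.ofList xs) (fun y => y) false

-- ===== PORT A =====
def recFuel (fuel : Nat) (list_ : List Int) (i : Int) : List Int :=
  match fuel with
  | 0 => []           -- fuel guard only
  | Nat.succ fuel =>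
    match PySem.List.pyGet? list_ i with
    | none => []      -- list_[i] raises IndexError: excluded by Pre_rec
    | some xi =>
      let a := xi + 3
      let b := xi * 2
      if a > 19 ∧ b > 19 then (list_ ++ [a]) ++ [b]
      else recFuel fuel (pvNxt ((list_ ++ [a]) ++ [b])) (i + 1)

def rec (list_ : List Int) (i : Int) : List Int := recFuel (pvFuel + 1) list_ i

-- ===== PORT B =====
-- the `while lo < hi` binary search of B's _insert_absent; fuel = the interval length,
-- which bounds the iteration count (the interval shrinks every iteration)
def bsLoop (fuel : Nat) (cur : List Int) (v : Int) (lo hi : Nat) : Nat :=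
  match fuel with
  | 0 => lo
  | Nat.succ fuel =>
    if lo < hi then
      let mid := (lo + hi) / 2
      if PySem.List.pyGetD cur (mid : Int) 0 < v then bsLoop fuel cur v (mid + 1) hi
      else bsLoop fuel cur v lo mid
    else lo

-- B's _insert_absent
def insertAbsent (cur : List Int) (v : Int) : List Int :=
  let lo := bsLoop cur.length cur v 0 cur.length
  if lo = cur.length ∨ ¬ PySem.List.pyGetD cur (lo : Int) 0 = v then
    PySem.List.insert cur (lo : Int) v
  else cur

-- the `while True` loop of B; the working list stays sorted and duplicate-free
def recLoop (fuel : Nat) (cur : List Int) (i : Int) : List Int :=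
  match fuel with
  | 0 => []           -- fuel guard only
  | Nat.succ fuel =>
    match PySem.List.pyGet? cur i with
    | none => []      -- cur[i] raises IndexError: excluded by Pre_rec
    | some x =>
      if 17 ≤ x then cur ++ [x + 3, x * 2]
      else recLoop fuel (insertAbsent (insertAbsent cur (x + 3)) (x * 2)) (i + 1)

def rec_alt (list_ : List Int) (i : Int) : List Int :=
  match PySem.List.pyGet? list_ i with
  | none => []        -- list_[i] raises IndexError: excluded by Pre_rec
  | some x =>
    if 17 ≤ x then list_ ++ [x + 3, x * 2]
    else recLoop pvFuel (pvNxt (list_ ++ [x + 3, x * 2])) (i + 1)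

-- ===== PRECONDITION & SPEC =====
-- Pre_rec excludes exactly the inputs on which the Python A raises IndexError: the first
-- subscript list_[i] and, when the first round does not already return, the second subscript
-- (into the sorted deduplicated list) — from there on the list only grows, so no later
-- subscript can fail.
def Pre_rec (list_ : List Int) (i : Int) : Prop :=
  PySem.Raise.InRange list_.length i ∧
  ((17 : Int) ≤ (PySem.List.pyGet? list_ i).getD 17 ∨
    PySem.Raise.InRange
      (PySem.List.dedup ((list_ ++ [(PySem.List.pyGet? list_ i).getD 17 + 3]) ++
        [(PySem.List.pyGet? list_ i).getD 17 * 2])).length (i + 1))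
instance (list_ : List Int) (i : Int) : Decidable (Pre_rec list_ i) := by
  unfold Pre_rec; infer_instance

def pvWitness_rec : List Int × Int := ([4, 5], 0)

def Spec_rec (list_ : List Int) (i : Int) (out : List Int) : Prop := out = rec_alt list_ i
instance (list_ : List Int) (i : Int) (out : List Int) : Decidable (Spec_rec list_ i out) := by
  unfold Spec_rec; infer_instance

-- ===== CLAIM (what is proved, stated in full; the proofs are below) =====
def Claim_equal_rec : Prop := ∀ (list_ : List Int) (i : Int), Dom_rec list_ i → Pre_rec list_ i → Spec_rec list_ i (rec list_ i)

-- ===== LEMMAS AND PROOFS =====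
theorem pvNxt_pairwise (xs : List Int) : (pvNxt xs).Pairwise (· < ·) :=
  PySem.List.sorted_ofList_pairwise_lt xs

theorem pvNxt_nodup (xs : List Int) : (pvNxt xs).Nodup :=
  (pvNxt_pairwise xs).imp (fun h => ne_of_lt h)

theorem pvMem_nxt (xs : List Int) (y : Int) : y ∈ pvNxt xs ↔ y ∈ xs := by
  unfold pvNxt
  rw [PySem.List.mem_sorted, PySem.Set.mem_ofList]

-- sorted(set(·)) is idempotent
theorem pvNxt_canon (xs : List Int) : pvNxt (pvNxt xs) = pvNxt xs := by
  have h2 := PySem.Set.ofList_eq_self_of_nodup (pvNxt xs) (pvNxt_nodup xs)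
  have h1 : pvNxt (pvNxt xs) = PySem.List.sorted (PySem.Set.ofList (pvNxt xs)) (fun y => y) false := rfl
  rw [h1, h2]
  exact PySem.List.sorted_eq_self_of_pairwise _ _ ((pvNxt_pairwise xs).imp (fun h => le_of_lt h))

-- the binary search returns the count of elements below v (fuel ≥ interval length suffices:
-- the interval shrinks every iteration)
theorem pvBs (L : List Int) (v : Int) (hs : L.Pairwise (· < ·)) :
    ∀ (f lo hi : Nat), hi - lo ≤ f → lo ≤ hi → hi ≤ L.length →
    (∀ j (hj : j < L.length), j < lo → L[j] < v) →
    (∀ j (hj : j < L.length), hi ≤ j → v ≤ L[j]) →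
    bsLoop f L v lo hi ≤ L.length ∧
    (∀ j (hj : j < L.length), j < bsLoop f L v lo hi → L[j] < v) ∧
    (∀ j (hj : j < L.length), bsLoop f L v lo hi ≤ j → v ≤ L[j]) := by
  have hmono : ∀ p q (hp : p < L.length) (hq : q < L.length), p < q → L[p] < L[q] := by
    intro p q hp hq hpq
    exact List.pairwise_iff_getElem.mp hs p q hp hq hpq
  intro f
  induction f with
  | zero =>
    intro lo hi hf hlohi hhi hlo hhi2
    have hEq : lo = hi := by omega
    subst hEq
    simp only [bsLoop]
    exact ⟨by omega, hlo, hhi2⟩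
  | succ f ih =>
    intro lo hi hf hlohi hhi hlo hhi2
    rw [bsLoop]
    by_cases hlt : lo < hi
    · rw [if_pos hlt]
      have hmidlt : (lo + hi) / 2 < L.length := by omega
      have hget : PySem.List.pyGetD L (((lo + hi) / 2 : Nat) : Int) 0 = L[(lo + hi) / 2] := by
        rw [PySem.List.pyGetD_natCast]
        exact List.getD_eq_getElem L 0 hmidlt
      simp only [hget]
      by_cases hmv : L[(lo + hi) / 2] < v
      · rw [if_pos hmv]
        apply ih ((lo + hi) / 2 + 1) hi (by omega) (by omega) hhi
        · intro j hj hjlo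
          rcases Nat.lt_or_ge j ((lo + hi) / 2) with h | h
          · exact lt_trans (hmono j _ hj hmidlt h) hmv
          · have : j = (lo + hi) / 2 := by omega
            subst this; exact hmv
        · exact hhi2
      · rw [if_neg hmv]
        apply ih lo ((lo + hi) / 2) (by omega) (by omega) (by omega) hlo
        intro j hj hjge
        rcases Nat.lt_or_ge ((lo + hi) / 2) j with h | h
        · have := hmono _ j hmidlt hj h
          omega
        · have : j = (lo + hi) / 2 := by omega
          subst this; omega
    · rw [if_neg hlt]
      have hEq : lo = hi := by omega
      subst hEq
      exact ⟨by omega, hlo, hhi2⟩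

theorem pvInsertAbsent_eq (L : List Int) (v : Int) (hs : L.Pairwise (· < ·)) :
    insertAbsent L v = pvNxt (L ++ [v]) := by
  have hnd : L.Nodup := hs.imp (fun h => ne_of_lt h)
  obtain ⟨hr1, hr2, hr3⟩ := pvBs L v hs L.length 0 L.length (by omega) (by omega) le_rfl
    (by intro j hj h; omega) (by intro j hj h; omega)
  set r := bsLoop L.length L v 0 L.length with hr
  simp only [insertAbsent]
  rw [← hr]
  by_cases hcond : r = L.length ∨ ¬ PySem.List.pyGetD L (r : Int) 0 = v
  · -- v is absent: real insertion at position r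
    rw [if_pos hcond]
    have hvnot : v ∉ L := by
      intro hv
      obtain ⟨j, hj, hjv⟩ := List.mem_iff_getElem.mp hv
      rcases Nat.lt_or_ge j r with h | h
      · have := hr2 j hj h; omega
      · have hrlen : r < L.length := by omega
        have hrv : L[r] = v := by
          have h1 := hr3 r hrlen le_rfl
          rcases Nat.eq_or_lt_of_le h with he | hlt
          · simp only [he]; exact hjv
          · have h2 := List.pairwise_iff_getElem.mp hs r j hrlen hj hlt
            omega
        rcases hcond with h | h
        · omega
        · rw [PySem.List.pyGetD_natCast, List.getD_eq_getElem L 0 hrlen] at h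
          exact h hrv
    have hRHS : pvNxt (L ++ [v]) = L.take r ++ v :: L.drop r := by
      unfold pvNxt
      rw [PySem.Set.ofList_append_singleton, PySem.Set.ofList_eq_self_of_nodup L hnd,
        PySem.Set.add_of_not_mem hvnot]
      apply PySem.List.sorted_eq_of_perm_of_pairwise_lt
      · have h1 : (L.take r ++ v :: L.drop r).Perm (v :: (L.take r ++ L.drop r)) :=
          List.perm_middle
        rw [List.take_append_drop] at h1
        exact h1.trans (List.perm_append_singleton v L).symm
      · rw [List.pairwise_append]
        refine ⟨List.Pairwise.sublist (List.take_sublist r L) hs, ?_, ?_⟩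
        · rw [List.pairwise_cons]
          refine ⟨?_, List.Pairwise.sublist (List.drop_sublist r L) hs⟩
          intro y hy
          obtain ⟨t, ht, hty⟩ := List.mem_iff_getElem.mp hy
          rw [List.getElem_drop] at hty
          rw [List.length_drop] at ht
          have h1 := hr3 (r + t) (by omega) (by omega)
          have h2 : v ≠ y := by
            intro he; subst he
            exact hvnot (hty ▸ List.getElem_mem (by omega))
          omega
        · intro y hy z hz
          obtain ⟨t, ht, hty⟩ := List.mem_iff_getElem.mp hy
          rw [List.getElem_take] at hty
          rw [List.length_take] at ht
          have htr : t < r := by omega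
          have h1 := hr2 t (by omega) htr
          rcases List.mem_cons.mp hz with rfl | hz'
          · omega
          · obtain ⟨u, hu, huz⟩ := List.mem_iff_getElem.mp hz'
            rw [List.getElem_drop] at huz
            rw [List.length_drop] at hu
            have h2 := hr3 (r + u) (by omega) (by omega)
            omega
    rw [hRHS, PySem.List.insert_natCast L r v hr1]

  · -- v is present at position r: nothing to do
    rw [if_neg hcond]
    push_neg at hcond
    obtain ⟨hrlen', hrv⟩ := hcond
    have hrlen : r < L.length := by omega
    rw [PySem.List.pyGetD_natCast, List.getD_eq_getElem L 0 hrlen] at hrv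
    have hvmem : v ∈ L := hrv ▸ List.getElem_mem hrlen
    unfold pvNxt
    rw [PySem.Set.ofList_append_singleton, PySem.Set.ofList_eq_self_of_nodup L hnd,
      PySem.Set.add_of_mem hvmem]
    exact (PySem.List.sorted_eq_self_of_pairwise _ _ (hs.imp (fun h => le_of_lt h))).symm

theorem pvInsert2_eq (L : List Int) (a b : Int) (hs : L.Pairwise (· < ·)) :
    insertAbsent (insertAbsent L a) b = pvNxt ((L ++ [a]) ++ [b]) := by
  rw [pvInsertAbsent_eq L a hs]
  rw [pvInsertAbsent_eq (pvNxt (L ++ [a])) b (pvNxt_pairwise _)]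
  unfold pvNxt
  apply PySem.List.sorted_eq_sorted_of_perm _ _ _ (fun x y h => h)
  rw [List.perm_ext_iff_of_nodup (PySem.Set.nodup_ofList _) (PySem.Set.nodup_ofList _)]
  intro y
  rw [PySem.Set.mem_ofList, PySem.Set.mem_ofList]
  constructor
  · intro h
    rcases List.mem_append.mp h with h | h
    · have := (pvMem_nxt (L ++ [a]) y).mp h
      simp at this ⊢
      tauto
    · simp at h ⊢
      tauto
  · intro h
    rcases List.mem_append.mp h with h | h
    · exact List.mem_append.mpr (Or.inl ((pvMem_nxt (L ++ [a]) y).mpr h))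
    · exact List.mem_append.mpr (Or.inr h)

-- with equal fuel and a canonical working list, B's loop computes A's recursion
theorem pvLoopEq (f : Nat) : ∀ (L : List Int) (i : Int), pvNxt L = L →
    recLoop f L i = recFuel f L i := by
  induction f with
  | zero => intro L i _; rfl
  | succ f ih =>
    intro L i hc
    rw [recLoop, recFuel]
    cases hg : PySem.List.pyGet? L i with
    | none => rfl
    | some x =>
      show (if 17 ≤ x then L ++ [x + 3, x * 2]
            else recLoop f (insertAbsent (insertAbsent L (x + 3)) (x * 2)) (i + 1)) =
           (if x + 3 > 19 ∧ x * 2 > 19 then (L ++ [x + 3]) ++ [x * 2]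
            else recFuel f (pvNxt ((L ++ [x + 3]) ++ [x * 2])) (i + 1))
      split_ifs with h1 h2 h2
      · simp
      · omega
      · omega
      · have hs : L.Pairwise (· < ·) := hc ▸ pvNxt_pairwise L
        rw [pvInsert2_eq L (x + 3) (x * 2) hs]
        exact ih (pvNxt ((L ++ [x + 3]) ++ [x * 2])) (i + 1) (pvNxt_canon _)

-- ===== VERDICT (by name: the statement is the Claim_ definition above) =====
theorem rec_spec : Claim_equal_rec := by
  intro list_ i _ _
  unfold Spec_rec rec rec_alt
  rw [show pvFuel + 1 = Nat.succ pvFuel from rfl, recFuel]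
  cases hg : PySem.List.pyGet? list_ i with
  | none => rfl
  | some x =>
    show (if x + 3 > 19 ∧ x * 2 > 19 then (list_ ++ [x + 3]) ++ [x * 2]
          else recFuel pvFuel (pvNxt ((list_ ++ [x + 3]) ++ [x * 2])) (i + 1)) =
         (if 17 ≤ x then list_ ++ [x + 3, x * 2]
          else recLoop pvFuel (pvNxt (list_ ++ [x + 3, x * 2])) (i + 1))
    split_ifs with h1 h2 h2
    · simp
    · omega
    · omega
    · rw [pvLoopEq pvFuel _ _ (pvNxt_canon _)]
      congr 2
      simp
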